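-- pv_equiv track=rewrite | github.com/hexhoc/leetcode | leetcode/arrays/introduction/MaxConsecutiveOnes2.py | GetConsecutive
-- ===== SOURCE A (Python) =====
-- def GetConsecutive(start_index:int, nums: list[int], flip:int) -> int:
--     flip -= 1
--     counter:int = 1
--     for i in range(start_index, len(nums)):
--         if nums[i] == 1:
--             counter += 1
--         else:
--             if flip > 0:
--                 counter += GetConsecutive(i+1, nums, flip)
--             break
--     return counter
-- ===== SOURCE B (Python) =====
-- def GetConsecutive(start_index: int, nums: list[int], flip: int) -> int:
--     # Iterative single pass replacing A's recursion: each recursive restart of A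
--     # contributes its fresh counter=1 base and one more flip decrement, which the
--     # loop emulates by consuming one flip and counting the zero position once.
--     flip -= 1
--     counter = 1
--     i = start_index
--     n = len(nums)
--     while i < n:
--         if nums[i] == 1:
--             counter += 1
--             i += 1
--         else:
--             if flip > 0:
--                 flip -= 1
--                 counter += 1
--                 i += 1
--             else:
--                 break
--     return counter
-- ===== Notes on version B (the rewrite author's own statement) =====
-- stated objective: simpler
-- what changed: Replaced A's recursive restart after each flipped zero by a single iterative while-loop that carries the remaining flip budget and counter across zeros.
import Mathlib
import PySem

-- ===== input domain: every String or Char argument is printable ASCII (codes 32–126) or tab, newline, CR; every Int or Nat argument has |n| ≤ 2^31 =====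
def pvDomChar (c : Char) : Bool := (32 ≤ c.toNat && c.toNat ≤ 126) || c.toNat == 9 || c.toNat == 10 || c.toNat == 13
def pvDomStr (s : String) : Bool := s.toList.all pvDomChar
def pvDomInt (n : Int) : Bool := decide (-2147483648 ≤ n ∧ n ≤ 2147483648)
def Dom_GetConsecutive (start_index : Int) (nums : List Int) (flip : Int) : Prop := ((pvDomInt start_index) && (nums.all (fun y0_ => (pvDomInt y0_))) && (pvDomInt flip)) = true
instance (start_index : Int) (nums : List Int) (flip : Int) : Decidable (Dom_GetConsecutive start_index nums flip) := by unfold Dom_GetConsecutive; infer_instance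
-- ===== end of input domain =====

-- B replaces A's recursion after each flipped zero with one iterative pass; return values proved equal on Pre_ (A raises IndexError outside it).

-- ===== PORT A =====
-- A's for-loop over range(start_index, len(nums)); in the zero branch,
-- `counter += GetConsecutive(i+1, nums, flip)` is the recursive call with its
-- entry code (flip -= 1; counter = 1; same loop from i+1) inlined. `gas` is a
-- totality guard only: it is chosen large enough at the entry point that it
-- never runs out on the computation A performs.
def GetConsecutiveA_loop (nums : List Int) : Nat → List Int → Int → Int → Int
  | 0, _, _, counter => counter
  | gas + 1, idxs, flip, counter =>
    match idxs with
    | [] => counter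
    | i :: rest =>
      match PySem.List.pyGet? nums i with
      | none => counter  -- IndexError in Python; excluded by Pre_GetConsecutive
      | some v =>
        if v = 1 then
          GetConsecutiveA_loop nums gas rest flip (counter + 1)
        else
          if flip > 0 then
            counter + GetConsecutiveA_loop nums gas (PySem.List.pyRange (i + 1) nums.length 1) (flip - 1) 1
          else
            counter

def GetConsecutive (start_index : Int) (nums : List Int) (flip : Int) : Int :=
  GetConsecutiveA_loop nums ((flip - 1).toNat + ((nums.length : Int) - start_index).toNat)
    (PySem.List.pyRange start_index nums.length 1) (flip - 1) 1

-- ===== PORT B =====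
-- B's while-loop; `gas` is a totality guard only, set to (n - i).toNat at the
-- entry point, which is exactly the number of remaining iterations.
def GetConsecutiveB_loop (nums : List Int) (n : Int) : Int → Int → Int → Nat → Int
  | _, counter, _, 0 => counter
  | flip, counter, i, gas + 1 =>
    if i < n then
      match PySem.List.pyGet? nums i with
      | none => counter  -- IndexError in Python; excluded by Pre_GetConsecutive
      | some v =>
        if v = 1 then
          GetConsecutiveB_loop nums n flip (counter + 1) (i + 1) gas
        else
          if flip > 0 then
            GetConsecutiveB_loop nums n (flip - 1) (counter + 1) (i + 1) gas
          else
            counter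
    else counter

def GetConsecutive_alt (start_index : Int) (nums : List Int) (flip : Int) : Int :=
  GetConsecutiveB_loop nums nums.length (flip - 1) 1 start_index
    (((nums.length : Int) - start_index).toNat)

-- ===== PRECONDITION & SPEC =====
-- Pre_ excludes exactly the inputs where Python's nums[i] raises IndexError:
-- start_index below -len(nums) (the first loop index is already out of range).
def Pre_GetConsecutive (start_index : Int) (nums : List Int) (flip : Int) : Prop :=
  -(nums.length : Int) ≤ start_index
instance (start_index : Int) (nums : List Int) (flip : Int) : Decidable (Pre_GetConsecutive start_index nums flip) := by unfold Pre_GetConsecutive; infer_instance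

def pvWitness_GetConsecutive : Int × List Int × Int := (0, [1, 0, 1, 1, 0], 2)

def Spec_GetConsecutive (start_index : Int) (nums : List Int) (flip : Int) (out : Int) : Prop := out = GetConsecutive_alt start_index nums flip
instance (start_index : Int) (nums : List Int) (flip : Int) (out : Int) : Decidable (Spec_GetConsecutive start_index nums flip out) := by unfold Spec_GetConsecutive; infer_instance

-- ===== CLAIM (what is proved, stated in full; the proofs are below) =====
def Claim_equal_GetConsecutive : Prop := ∀ (start_index : Int) (nums : List Int) (flip : Int), Dom_GetConsecutive start_index nums flip → Pre_GetConsecutive start_index nums flip → Spec_GetConsecutive start_index nums flip (GetConsecutive start_index nums flip)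

-- ===== LEMMAS AND PROOFS =====

-- Shifting B's counter accumulator out of the loop.
theorem B_loop_shift (nums : List Int) (n : Int) (gas : Nat) :
    ∀ (flip c i : Int),
      GetConsecutiveB_loop nums n flip c i gas = (c - 1) + GetConsecutiveB_loop nums n flip 1 i gas := by
  induction gas with
  | zero => intro flip c i; simp [GetConsecutiveB_loop]
  | succ gas ih =>
    intro flip c i
    by_cases h : i < n
    · simp only [GetConsecutiveB_loop, if_pos h]
      cases hg : PySem.List.pyGet? nums i with
      | none => simp
      | some v =>
        simp only
        by_cases hv : v = 1
        · rw [if_pos hv, if_pos hv, ih flip (c + 1) (i + 1), ih flip (1 + 1) (i + 1)]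
          ring
        · rw [if_neg hv, if_neg hv]
          by_cases hf : flip > 0
          · rw [if_pos hf, if_pos hf, ih (flip - 1) (c + 1) (i + 1), ih (flip - 1) (1 + 1) (i + 1)]
            ring
          · rw [if_neg hf, if_neg hf]
            ring
    · simp only [GetConsecutiveB_loop, if_neg h]
      ring

-- Main agreement: A's loop over range(i, len) equals B's while-loop from i,
-- for any sufficient fuel on either side.
theorem loops_agree (nums : List Int) (gasA : Nat) :
    ∀ (gasB : Nat) (flip c i : Int),
      flip.toNat + ((nums.length : Int) - i).toNat ≤ gasA →
      ((nums.length : Int) - i).toNat ≤ gasB →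
      GetConsecutiveA_loop nums gasA (PySem.List.pyRange i nums.length 1) flip c
        = GetConsecutiveB_loop nums nums.length flip c i gasB := by
  induction gasA with
  | zero =>
    intro gasB flip c i hA _
    have hi : ¬ (i < (nums.length : Int)) := by omega
    rw [PySem.List.pyRange_one_eq_nil (by omega)]
    cases gasB with
    | zero => simp [GetConsecutiveA_loop, GetConsecutiveB_loop]
    | succ gb => simp [GetConsecutiveA_loop, GetConsecutiveB_loop, hi]
  | succ gas ih =>
    intro gasB flip c i hA hB
    by_cases h : i < (nums.length : Int)
    · obtain ⟨gb, rfl⟩ : ∃ gb, gasB = gb + 1 := ⟨gasB - 1, by omega⟩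
      rw [PySem.List.pyRange_one_cons h]
      simp only [GetConsecutiveA_loop, GetConsecutiveB_loop, if_pos h]
      cases hg : PySem.List.pyGet? nums i with
      | none => simp
      | some v =>
        simp only
        by_cases hv : v = 1
        · rw [if_pos hv, if_pos hv]
          exact ih gb flip (c + 1) (i + 1) (by omega) (by omega)
        · rw [if_neg hv, if_neg hv]
          by_cases hf : flip > 0
          · rw [if_pos hf, if_pos hf,
                ih gb (flip - 1) 1 (i + 1) (by omega) (by omega),
                B_loop_shift nums (nums.length : Int) gb (flip - 1) (c + 1) (i + 1)]
            ring
          · rw [if_neg hf, if_neg hf]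
    · rw [PySem.List.pyRange_one_eq_nil (by omega)]
      cases gasB with
      | zero => simp [GetConsecutiveA_loop, GetConsecutiveB_loop]
      | succ gb => simp [GetConsecutiveA_loop, GetConsecutiveB_loop, h]

-- ===== VERDICT (by name: the statement is the Claim_ definition above) =====
theorem GetConsecutive_spec : Claim_equal_GetConsecutive := by
  intro start_index nums flip _ _
  unfold Spec_GetConsecutive GetConsecutive GetConsecutive_alt
  exact loops_agree nums _ _ (flip - 1) 1 start_index (by omega) (by omega)
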